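-- pv_equiv track=rewrite | github.com/Claymore2106/WEP-Explorer | KDF.py | wepkey64
-- ===== SOURCE A (Python) =====
-- def wepkey64(val):
--     pseed = [0, 0, 0, 0]
--     randNumber = 0
--     k64 = ["", "", "", ""]
--     i = 0
--     j = 0
--     tmp = 0
--     while i < len(val):
--         pseed[i % 4] ^= ord(val[i])
--         i += 1
--
--     randNumber = pseed[0] | (pseed[1] << 8) | (pseed[2] << 16) | (pseed[3] << 32)
--
--     i = 0
--     while i < 4:
--         j = 0
--         while j < 5:
--             randNumber = (randNumber * 0x343fd + 0x269ec3) & 0xffffffff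
--             tmp = (randNumber >> 16) & 0xff
--             s = str(hex(tmp)[2:])  # Remove the \0x: 5d
--             s = s.zfill(2)  # Ensure leading 0: '6' vs '06'
--             k64[i] += s.upper()  # Upper case letters look nicer
--             j += 1
--         i += 1
--
--     return k64
-- ===== SOURCE B (Python) =====
-- def wepkey64(val):
--     # seed: four strided passes (one per lane) instead of one interleaved pass
--     r = 0
--     for sh, off in ((0, 0), (8, 1), (16, 2), (32, 3)):
--         acc = 0
--         for ch in val[off::4]:
--             acc ^= ord(ch)
--         r |= acc << sh
--
--     # pack all 20 PRNG bytes into one big integer, format it once, slice into 4 keys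
--     v = 0
--     for _ in range(20):
--         r = (r * 0x343FD + 0x269EC3) & 0xFFFFFFFF
--         v = v * 256 + ((r >> 16) & 0xFF)
--     h = format(v, '040X')
--     return [h[i:i + 10] for i in range(0, 40, 10)]
-- ===== Notes on version B (the rewrite author's own statement) =====
-- stated objective: alternative
-- what changed: The seed is computed by four independent strided passes (one XOR fold per lane over a step-4 slice of val) instead of one interleaved loop updating a 4-slot array, and the four keys are produced by packing all 20 PRNG bytes into one big integer, hex-formatting it with a single fixed-width format call and slicing the 40-char string, instead of per-byte hex/zfill/upper formatting appended inside nested 4x5 loops.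
import Mathlib
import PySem

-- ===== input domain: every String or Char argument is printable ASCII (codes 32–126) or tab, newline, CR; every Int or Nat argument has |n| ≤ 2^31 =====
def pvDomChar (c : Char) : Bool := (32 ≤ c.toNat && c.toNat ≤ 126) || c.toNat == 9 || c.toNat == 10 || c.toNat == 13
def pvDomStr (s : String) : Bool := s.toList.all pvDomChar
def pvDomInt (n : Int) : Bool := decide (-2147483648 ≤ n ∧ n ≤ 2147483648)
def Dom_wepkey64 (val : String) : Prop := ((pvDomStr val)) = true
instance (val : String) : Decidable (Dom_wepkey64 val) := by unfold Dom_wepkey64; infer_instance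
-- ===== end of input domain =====

-- B replaces A's interleaved XOR-seed loop by four strided per-lane passes and A's nested 4×5
-- key-building loops by packing all 20 PRNG bytes into one big integer formatted once and sliced
-- into the four keys; a different decomposition (a timing run measured it constant-factor faster).


-- All Python ints here are nonnegative (XORs of ord values, shifted/masked LCG state), so Nat arithmetic is exact.

-- `(r * 0x343fd + 0x269ec3) & 0xffffffff` (shared text of both sources)
def pvLcg (r : Nat) : Nat := (r * 0x343fd + 0x269ec3) &&& 0xffffffff

-- ===== PORT A =====
-- `pseed[i % 4] ^= ord(val[i])` loop
def pvSeed : List Char → Nat → List Nat → List Nat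
  | [], _, ps => ps
  | c :: rest, i, ps => pvSeed rest (i + 1) (ps.set (i % 4) ((ps.getD (i % 4) 0) ^^^ c.toNat))

-- `pseed[0] | (pseed[1] << 8) | (pseed[2] << 16) | (pseed[3] << 32)`
def pvRand (ps : List Nat) : Nat :=
  ps.getD 0 0 ||| (ps.getD 1 0 <<< 8) ||| (ps.getD 2 0 <<< 16) ||| (ps.getD 3 0 <<< 32)

def pvHexDigit (n : Nat) : Char := if n < 10 then Char.ofNat (48 + n) else Char.ofNat (87 + n)

-- `hex(tmp)[2:].zfill(2).upper()`; exact for tmp in 0..255 (tmp is always a masked byte)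
def pvHexByte (t : Nat) : String :=
  let ds := if t < 16 then [pvHexDigit t] else [pvHexDigit (t / 16), pvHexDigit (t % 16)]
  let ds := if ds.length < 2 then '0' :: ds else ds       -- zfill(2)
  String.ofList (ds.map Char.toUpper)                     -- .upper()

-- body of the inner `while j < 5` loop: advance the PRNG, append one formatted byte
def pvInnerStep (p : Nat × String) (_ : Nat) : Nat × String :=
  let r' := pvLcg p.1
  (r', p.2 ++ pvHexByte ((r' >>> 16) &&& 0xff))

def wepkey64 (val : String) : List String :=
  let pseed := pvSeed val.toList 0 [0, 0, 0, 0]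
  let r0 := pvRand pseed
  -- outer `while i < 4` loop over the four key slots; inner `while j < 5` loop as a fold
  let st := (List.range 4).foldl
    (fun (st : Nat × List String) i =>
      let (r, k) := st
      let inner := (List.range 5).foldl pvInnerStep (r, k.getD i "")
      (inner.1, k.set i inner.2))
    (r0, ["", "", "", ""])
  st.2

-- ===== PORT B =====
-- `val[off::4]` for 0 ≤ off ≤ 3: drop `off`, then every 4th element (exact extended-slice semantics here)
def pvEvery4 : List Char → List Char
  | [] => []
  | c :: r => c :: pvEvery4 (r.drop 3)
termination_by xs => xs.length
decreasing_by simp [List.length_drop]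

-- `acc = 0; for ch in val[off::4]: acc ^= ord(ch)`
def pvLane (xs : List Char) (off : Nat) : Nat :=
  (pvEvery4 (xs.drop off)).foldl (fun a c => a ^^^ c.toNat) 0

-- body of `for _ in range(20): r = lcg(r); v = v*256 + (r >> 16 & 0xFF)`
def pvPackStep (p : Nat × Nat) (_ : Nat) : Nat × Nat :=
  let r' := pvLcg p.1
  (r', p.2 * 256 + ((r' >>> 16) &&& 0xff))

def pvDigU (n : Nat) : Char := if n < 10 then Char.ofNat (48 + n) else Char.ofNat (55 + n)

-- `format(v, '040X')` as a char list: w hex digits, leading zeros; exact since v < 16^40 here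
def pvHexFixed : Nat → Nat → List Char
  | 0, _ => []
  | w + 1, v => pvHexFixed w (v / 16) ++ [pvDigU (v % 16)]

def wepkey64_alt (val : String) : List String :=
  let xs := val.toList
  -- `r = 0; for sh, off in ((0,0),(8,1),(16,2),(32,3)): r |= lane << sh`
  let r0 := (((0 ||| (pvLane xs 0 <<< 0)) ||| (pvLane xs 1 <<< 8)) ||| (pvLane xs 2 <<< 16))
              ||| (pvLane xs 3 <<< 32)
  let rv := (List.range 20).foldl pvPackStep (r0, 0)
  let h := pvHexFixed 40 rv.2
  -- `[h[i:i+10] for i in range(0, 40, 10)]`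
  (PySem.List.pyRange 0 40 10).map (fun i =>
    String.ofList (PySem.List.slice h (some i) (some (i + 10))))

-- ===== PRECONDITION & SPEC =====
def Spec_wepkey64 (val : String) (out : List String) : Prop := out = wepkey64_alt val
instance (val : String) (out : List String) : Decidable (Spec_wepkey64 val out) := by unfold Spec_wepkey64; infer_instance

-- ===== CLAIM =====
def Claim_equal_wepkey64 : Prop := ∀ (val : String), Dom_wepkey64 val → Spec_wepkey64 val (wepkey64 val)

-- ===== LEMMAS AND PROOFS =====

-- ---- seed stage: the interleaved pseed loop equals the four strided lane folds ----

theorem pv_xor_foldl (l : List Char) (a : Nat) :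
    l.foldl (fun a c => a ^^^ c.toNat) a = a ^^^ l.foldl (fun a c => a ^^^ c.toNat) 0 := by
  induction l generalizing a with
  | nil => simp
  | cons c r ih => simp only [List.foldl]; rw [ih, ih (0 ^^^ c.toNat)]; simp [Nat.xor_assoc]

theorem pvLane_nil (m : Nat) : pvLane [] m = 0 := by
  simp [pvLane, pvEvery4]

theorem pvLane_cons_zero (c : Char) (r : List Char) :
    pvLane (c :: r) 0 = c.toNat ^^^ pvLane r 3 := by
  simp only [pvLane, List.drop_zero, pvEvery4]
  rw [List.foldl_cons, pv_xor_foldl]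
  simp

theorem pvLane_cons_succ (c : Char) (r : List Char) (m : Nat) :
    pvLane (c :: r) (m + 1) = pvLane r m := rfl

theorem pv_seed_char (xs : List Char) : ∀ (i p0 p1 p2 p3 : Nat),
    pvSeed xs i [p0, p1, p2, p3] =
      [p0 ^^^ pvLane xs ((4 - i % 4) % 4),
       p1 ^^^ pvLane xs ((5 - i % 4) % 4),
       p2 ^^^ pvLane xs ((6 - i % 4) % 4),
       p3 ^^^ pvLane xs ((7 - i % 4) % 4)] := by
  induction xs with
  | nil => intro i p0 p1 p2 p3; simp [pvSeed, pvLane_nil]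
  | cons c r ih =>
    intro i p0 p1 p2 p3
    have h4 : i % 4 = 0 ∨ i % 4 = 1 ∨ i % 4 = 2 ∨ i % 4 = 3 := by omega
    rcases h4 with h | h | h | h <;>
      · have h1 : (i + 1) % 4 = (i % 4 + 1) % 4 := by omega
        rw [h] at h1
        simp only [pvSeed, h]
        norm_num
        rw [ih, h1]
        norm_num [pvLane_cons_zero, pvLane_cons_succ, Nat.xor_assoc]

theorem pv_seed_eq (xs : List Char) :
    pvRand (pvSeed xs 0 [0, 0, 0, 0]) =
      (((0 ||| (pvLane xs 0 <<< 0)) ||| (pvLane xs 1 <<< 8)) ||| (pvLane xs 2 <<< 16))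
        ||| (pvLane xs 3 <<< 32) := by
  rw [pv_seed_char]
  norm_num [pvRand, List.getD]

-- ---- formatting stage ----

theorem pv_byte_lt (x : Nat) : (x >>> 16) &&& 0xff < 256 :=
  Nat.lt_succ_of_le Nat.and_le_right

set_option maxRecDepth 10000 in
theorem pv_hexbyte_eq : ∀ b < 256, pvHexByte b = String.ofList [pvDigU (b / 16), pvDigU (b % 16)] := by
  decide

theorem pv_hex_step (k v b : Nat) (hb : b < 256) :
    pvHexFixed (2 * k + 2) (v * 256 + b) = pvHexFixed (2 * k) v ++ [pvDigU (b / 16), pvDigU (b % 16)] := by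
  have h1 : (v * 256 + b) % 16 = b % 16 := by omega
  have h2 : (v * 256 + b) / 16 = v * 16 + b / 16 := by omega
  have h3 : (v * 16 + b / 16) / 16 = v := by omega
  have h4 : (v * 16 + b / 16) % 16 = b / 16 := by omega
  show pvHexFixed ((2 * k + 1) + 1) (v * 256 + b) = _
  rw [pvHexFixed, h1, h2]
  show pvHexFixed (2 * k + 1) (v * 16 + b / 16) ++ _ = _
  rw [pvHexFixed, h3, h4]
  simp

-- n-fold iterate of a step function (generic in f: its equations stay kernel-light)
def pvIterF (f : Nat → Nat) : Nat → Nat → Nat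
  | 0, r => r
  | n + 1, r => pvIterF f n (f r)

-- the char sequence the n PRNG bytes starting from state r format to (generic in f)
def pvBytesHexF (f : Nat → Nat) : Nat → Nat → List Char
  | 0, _ => []
  | n + 1, r =>
    let r' := f r
    pvDigU (((r' >>> 16) &&& 0xff) / 16) :: pvDigU (((r' >>> 16) &&& 0xff) % 16) :: pvBytesHexF f n r'

theorem pvIterF_succ (f : Nat → Nat) (n r : Nat) : pvIterF f (n + 1) r = pvIterF f n (f r) := rfl

theorem pvIterF_succ_right (f : Nat → Nat) : ∀ (n r : Nat), pvIterF f (n + 1) r = f (pvIterF f n r) := by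
  intro n
  induction n with
  | zero => intro r; rfl
  | succ n ih => intro r; rw [pvIterF_succ, ih, pvIterF_succ]

theorem pvBytesHexF_succ (f : Nat → Nat) (n r : Nat) :
    pvBytesHexF f (n + 1) r = pvDigU (((f r >>> 16) &&& 0xff) / 16) ::
      pvDigU (((f r >>> 16) &&& 0xff) % 16) :: pvBytesHexF f n (f r) := rfl

theorem pvBytesHexF_succ_right (f : Nat → Nat) : ∀ (n r : Nat),
    pvBytesHexF f (n + 1) r = pvBytesHexF f n r ++
      [pvDigU (((f (pvIterF f n r) >>> 16) &&& 0xff) / 16),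
       pvDigU (((f (pvIterF f n r) >>> 16) &&& 0xff) % 16)] := by
  intro n
  induction n with
  | zero => intro r; rfl
  | succ n ih =>
    intro r
    rw [pvBytesHexF_succ f (n + 1) r, ih (f r), ← pvIterF_succ, pvBytesHexF_succ f n r]
    simp

theorem pvBytesHexF_add (f : Nat → Nat) (m : Nat) : ∀ (n r : Nat),
    pvBytesHexF f (m + n) r = pvBytesHexF f m r ++ pvBytesHexF f n (pvIterF f m r) := by
  induction m with
  | zero =>
    intro n r
    rw [Nat.zero_add]
    rfl
  | succ m ih =>
    intro n r
    rw [show m + 1 + n = (m + n) + 1 from by omega, pvBytesHexF_succ, ih, pvBytesHexF_succ,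
        pvIterF_succ]
    simp

theorem pvBytesHexF_length (f : Nat → Nat) : ∀ (n r : Nat), (pvBytesHexF f n r).length = 2 * n := by
  intro n
  induction n with
  | zero => intro r; rfl
  | succ n ih => intro r; rw [pvBytesHexF_succ]; simp [ih]; omega

theorem pv_len10 (r : Nat) : (pvBytesHexF pvLcg 5 r).length = 10 :=
  pvBytesHexF_length pvLcg 5 r

-- A's inner loop in char-list form
theorem pv_innerA_chars : ∀ (n r : Nat) (s : List Char),
    (List.range n).foldl pvInnerStep (r, String.ofList s) =
      (pvIterF pvLcg n r, String.ofList (s ++ pvBytesHexF pvLcg n r)) := by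
  intro n
  induction n with
  | zero =>
    intro r s
    rw [List.range_zero, List.foldl_nil, show pvBytesHexF pvLcg 0 r = [] from rfl,
        List.append_nil, show pvIterF pvLcg 0 r = r from rfl]
  | succ n ih =>
    intro r s
    rw [List.range_succ, List.foldl_append, ih, List.foldl_cons, List.foldl_nil]
    show (pvLcg (pvIterF pvLcg n r),
        String.ofList (s ++ pvBytesHexF pvLcg n r) ++ pvHexByte ((pvLcg (pvIterF pvLcg n r) >>> 16) &&& 0xff)) = _
    rw [pv_hexbyte_eq _ (pv_byte_lt _), ← String.ofList_append, ← pvIterF_succ_right pvLcg n r,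
        pvBytesHexF_succ_right]
    simp
    rw [pvIterF_succ_right pvLcg n r]

-- B's packing loop: the final big integer formats to the flat byte-hex sequence
theorem pv_pack_fst : ∀ (n r v : Nat), ((List.range n).foldl pvPackStep (r, v)).1 = pvIterF pvLcg n r := by
  intro n
  induction n with
  | zero => intro r v; rw [List.range_zero, List.foldl_nil, show pvIterF pvLcg 0 r = r from rfl]
  | succ n ih =>
    intro r v
    rw [List.range_succ, List.foldl_append, List.foldl_cons, List.foldl_nil]
    show pvLcg ((List.range n).foldl pvPackStep (r, v)).1 = _
    rw [ih, pvIterF_succ_right]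

theorem pv_pack_hex : ∀ (n m r v : Nat),
    pvHexFixed (2 * m + 2 * n) (((List.range n).foldl pvPackStep (r, v)).2) =
      pvHexFixed (2 * m) v ++ pvBytesHexF pvLcg n r := by
  intro n
  induction n with
  | zero =>
    intro m r v
    rw [show 2 * m + 2 * 0 = 2 * m from by omega, List.range_zero, List.foldl_nil]
    rw [show pvBytesHexF pvLcg 0 r = [] from rfl, List.append_nil]
  | succ n ih =>
    intro m r v
    rw [List.range_succ, List.foldl_append, List.foldl_cons, List.foldl_nil]
    show pvHexFixed (2 * m + 2 * (n + 1))
        (((List.range n).foldl pvPackStep (r, v)).2 * 256 +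
          ((pvLcg ((List.range n).foldl pvPackStep (r, v)).1 >>> 16) &&& 0xff)) = _
    rw [show 2 * m + 2 * (n + 1) = 2 * (2 * m + 2 * n) / 2 + 2 from by omega]
    rw [show 2 * (2 * m + 2 * n) / 2 = 2 * m + 2 * n from by omega] at *
    rw [show (2 * m + 2 * n : Nat) = 2 * (m + n) from by omega, pv_hex_step _ _ _ (pv_byte_lt _),
        show (2 * (m + n) : Nat) = 2 * m + 2 * n from by omega, ih, pv_pack_fst,
        pvBytesHexF_succ_right]
    simp

theorem pv_hex40 (r : Nat) :
    pvHexFixed 40 (((List.range 20).foldl pvPackStep (r, 0)).2) = pvBytesHexF pvLcg 20 r := by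
  have h := pv_pack_hex 20 0 r 0
  rw [show (2 * 0 + 2 * 20 : Nat) = 40 from rfl] at h
  rw [show pvHexFixed (2 * 0) 0 = [] from rfl, List.nil_append] at h
  exact h

-- the key slices of the flat 40-char sequence
theorem pv_slice_none10 (B X : List Char) (h : B.length = 10) :
    PySem.List.slice (B ++ X) none (some (10 : Int)) = B := by
  rw [PySem.List.slice_to _ (by norm_num)]
  show List.take 10 (B ++ X) = B
  exact List.take_left' h

theorem pv_slice_all10 (B : List Char) (h : B.length = 10) :
    PySem.List.slice B none (some (10 : Int)) = B := by
  rw [PySem.List.slice_to _ (by norm_num)]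
  show List.take 10 B = B
  rw [← h]
  exact List.take_length

theorem pv_slice_skip10 (B X : List Char) (a b : Int) (h : B.length = 10) (ha : 10 ≤ a) (hab : a ≤ b) :
    PySem.List.slice (B ++ X) (some a) (some b) = PySem.List.slice X (some (a - 10)) (some (b - 10)) := by
  rw [PySem.List.slice_toNat _ (by omega) (by omega), PySem.List.slice_toNat _ (by omega) (by omega)]
  rw [List.drop_append, List.drop_eq_nil_of_le (by omega : B.length ≤ a.toNat), List.nil_append, h]
  rw [show b.toNat - a.toNat = (b - 10).toNat - (a - 10).toNat from by omega,
      show a.toNat - 10 = (a - 10).toNat from by omega]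

-- core: for any seed state, A's nested 4×5 build equals B's pack-format-slice
theorem pv_core (r : Nat) :
    ((List.range 4).foldl
      (fun (st : Nat × List String) i =>
        let (r, k) := st
        let inner := (List.range 5).foldl pvInnerStep (r, k.getD i "")
        (inner.1, k.set i inner.2))
      (r, ["", "", "", ""])).2
    = (PySem.List.pyRange 0 40 10).map (fun i =>
        String.ofList (PySem.List.slice (pvHexFixed 40 (((List.range 20).foldl pvPackStep (r, 0)).2))
          (some i) (some (i + 10)))) := by
  rw [pv_hex40]
  have hsplit : pvBytesHexF pvLcg 20 r =
      pvBytesHexF pvLcg 5 r ++ (pvBytesHexF pvLcg 5 (pvIterF pvLcg 5 r) ++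
        (pvBytesHexF pvLcg 5 (pvIterF pvLcg 5 (pvIterF pvLcg 5 r)) ++
          pvBytesHexF pvLcg 5 (pvIterF pvLcg 5 (pvIterF pvLcg 5 (pvIterF pvLcg 5 r))))) := by
    rw [show (20 : Nat) = 5 + 15 from rfl, pvBytesHexF_add pvLcg 5 15 r,
        show (15 : Nat) = 5 + 10 from rfl, pvBytesHexF_add pvLcg 5 10,
        show (10 : Nat) = 5 + 5 from rfl, pvBytesHexF_add pvLcg 5 5]
  rw [hsplit]
  rw [show PySem.List.pyRange 0 40 10 = [0, 10, 20, 30] from by decide,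
      show List.range 4 = [0, 1, 2, 3] from by decide]
  simp only [List.foldl_cons, List.foldl_nil, List.map]
  norm_num
  rw [show ("" : String) = String.ofList [] from rfl]
  rw [pv_innerA_chars]
  norm_num
  rw [pv_innerA_chars]
  norm_num
  rw [pv_innerA_chars]
  norm_num
  rw [pv_innerA_chars]
  norm_num
  refine ⟨?_, ?_, ?_, ?_⟩
  · rw [pv_slice_none10 _ _ (pv_len10 r)]
  · rw [pv_slice_skip10 _ _ _ _ (pv_len10 r) (by norm_num) (by norm_num)]
    norm_num
    rw [pv_slice_none10 _ _ (pv_len10 _)]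
  · rw [pv_slice_skip10 _ _ _ _ (pv_len10 r) (by norm_num) (by norm_num)]
    norm_num
    rw [pv_slice_skip10 _ _ _ _ (pv_len10 _) (by norm_num) (by norm_num)]
    norm_num
    rw [pv_slice_none10 _ _ (pv_len10 _)]
  · rw [pv_slice_skip10 _ _ _ _ (pv_len10 r) (by norm_num) (by norm_num)]
    norm_num
    rw [pv_slice_skip10 _ _ _ _ (pv_len10 _) (by norm_num) (by norm_num)]
    norm_num
    rw [pv_slice_skip10 _ _ _ _ (pv_len10 _) (by norm_num) (by norm_num)]
    norm_num
    rw [pv_slice_all10 _ (pv_len10 _)]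

-- ===== VERDICT =====
theorem wepkey64_spec : Claim_equal_wepkey64 := by
  intro val _
  unfold Spec_wepkey64 wepkey64 wepkey64_alt
  dsimp only
  rw [pv_seed_eq]
  exact pv_core _
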